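-- pv_equiv track=rewrite | github.com/fancompute/qpga | qpga/circuits.py | QFT_layer_count
-- ===== SOURCE A (Python) =====
-- def QFT_layer_count(num_qubits, nearest_neighbor_only = True, include_reshuffling = True):
--     '''
--     Counts the number of layers (1 layer = single qubit + CZ) required to
--     implement the n-qubit quantum Fourier transform. If nearest_neighbor_only set to
--     true, include gates to allow qubit A to talk to non-neighbor qubit B
--     '''
--     layers = 1
--     prev_gate_cz = False
--     for target_index in range(num_qubits):
--
--         # Hadamard on target requires 1 single qubit layer
--         if prev_gate_cz:
--             layers += 1
--         prev_gate_cz = False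
--
--         # Add controlled phase gates to each subsequent qubit
--         for control_index in range(target_index + 1, num_qubits):
--
--             # If include swap, needs 3 layers per swap from qubit 0 to qubit m
--             if nearest_neighbor_only:
--
--                 # Number of swaps needed to bring the control qubit adjacent to target qubit
--                 num_swaps = control_index - target_index - 1
--                 assert num_swaps >= 0
--
--                 # Move control to target
--                 if num_swaps > 0:
--                     layers += 3 * num_swaps
--                     prev_gate_cz = True  # swap ends on CZ
--
--                 # Controlled-phase of 2pi / 2^m requires 2 layers
--                 layers += 2
--                 prev_gate_cz = False
--
--                 # Move control qubit back to original position
--                 if num_swaps > 0: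
--                     layers += 3 * num_swaps
--                     prev_gate_cz = True  # swap ends on CZ
--
--             else:
--                 # Ignore swaps, just do controlled phase
--                 layers += 2
--
--     # Include swap gates to reshuffle the output qubits to be in the same order as input
--     if include_reshuffling:
--         for n in range(num_qubits // 2):
--             # We swap q1 with qN, q2 with qN-1, etc, which decomposes as a sequence of nearest neighbor swaps
--             if nearest_neighbor_only:
--                 # Don't track concatenation here because each swap ends on CZ
--                 num_auxilliary_swaps = (num_qubits - 1 - n) - n - 1
--                 assert num_auxilliary_swaps >= 0, (num_auxilliary_swaps, n, num_qubits)
--                 layers += 3 * num_auxilliary_swaps  # swap to bring qN to q1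
--                 layers += 3  # swap the now-neighboring target qubits
--                 layers += 3 * num_auxilliary_swaps  # swap to restore original ordering sans swap
--             else:
--                 layers += 3
--
--     # Return total count of layers
--     return layers
-- ===== SOURCE B (Python) =====
-- def QFT_layer_count(num_qubits, nearest_neighbor_only = True, include_reshuffling = True):
--     '''Closed-form count of layers for the n-qubit QFT circuit (no loops).'''
--     n = num_qubits
--     if n <= 0:
--         return 1
--     if nearest_neighbor_only:
--         layers = 1 + n * (n - 1) ** 2 + max(n - 2, 0)
--     else:
--         layers = 1 + n * (n - 1)
--     if include_reshuffling:
--         m = n // 2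
--         if nearest_neighbor_only:
--             layers += 3 * m + 6 * m * (n - 2) - 6 * m * (m - 1)
--         else:
--             layers += 3 * m
--     return layers
-- ===== Notes on version B (the rewrite author's own statement) =====
-- stated objective: faster
-- what changed: Replaced the nested target/control loops and the reshuffling loop by a closed-form polynomial formula (n*(n-1)^2 plus the max(n-2,0) prev_gate_cz carries, and an arithmetic-series formula for the reshuffling swaps), derived by summing the per-iteration contributions.
import Mathlib
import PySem

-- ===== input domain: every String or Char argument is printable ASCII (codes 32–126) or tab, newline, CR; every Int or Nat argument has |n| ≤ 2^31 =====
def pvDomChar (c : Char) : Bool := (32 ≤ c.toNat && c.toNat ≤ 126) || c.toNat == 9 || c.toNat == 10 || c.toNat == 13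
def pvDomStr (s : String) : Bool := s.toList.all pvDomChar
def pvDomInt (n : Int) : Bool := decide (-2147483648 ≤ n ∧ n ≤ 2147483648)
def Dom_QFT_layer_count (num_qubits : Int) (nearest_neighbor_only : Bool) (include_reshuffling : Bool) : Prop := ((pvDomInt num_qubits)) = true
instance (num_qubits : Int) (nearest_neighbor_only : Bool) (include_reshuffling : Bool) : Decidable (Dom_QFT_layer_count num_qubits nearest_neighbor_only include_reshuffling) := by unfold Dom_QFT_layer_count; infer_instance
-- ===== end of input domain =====

-- B replaces A's nested loops by a closed-form polynomial formula (objective: faster, O(1) vs O(n^2)).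

-- ===== PORT A =====
-- inner 'for control_index in range(target_index+1, num_qubits)' body; state = (layers, prev_gate_cz)
-- (the Python asserts 'num_swaps >= 0' / 'num_auxilliary_swaps >= 0' are provably true on every
--  reached iteration, so they are omitted; A returns on every input)
def pvInnerBody (nn : Bool) (ti : Int) (st : Int × Bool) (ci : Int) : Int × Bool :=
  if nn then
    let ns := ci - ti - 1
    let st1 := if ns > 0 then (st.1 + 3 * ns, true) else st
    let st2 := (st1.1 + 2, false)
    if ns > 0 then (st2.1 + 3 * ns, true) else st2
  else (st.1 + 2, st.2)

-- outer 'for target_index in range(num_qubits)' body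
def pvOuterBody (n : Int) (nn : Bool) (st : Int × Bool) (ti : Int) : Int × Bool :=
  let layers := if st.2 then st.1 + 1 else st.1
  (PySem.List.pyRange (ti + 1) n 1).foldl (pvInnerBody nn ti) (layers, false)

-- 'for n in range(num_qubits // 2)' body
def pvReshuffleBody (n : Int) (nn : Bool) (l : Int) (k : Int) : Int :=
  if nn then
    let aux := (n - 1 - k) - k - 1
    l + 3 * aux + 3 + 3 * aux
  else l + 3

def QFT_layer_count (num_qubits : Int) (nearest_neighbor_only : Bool) (include_reshuffling : Bool) : Int :=
  let st := (PySem.List.pyRange 0 num_qubits 1).foldl (pvOuterBody num_qubits nearest_neighbor_only) (1, false)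
  if include_reshuffling then
    (PySem.List.pyRange 0 (PySem.Int.floordiv num_qubits 2) 1).foldl
      (pvReshuffleBody num_qubits nearest_neighbor_only) st.1
  else st.1

-- ===== PORT B =====
def QFT_layer_count_alt (num_qubits : Int) (nearest_neighbor_only : Bool) (include_reshuffling : Bool) : Int :=
  let n := num_qubits
  if n ≤ 0 then 1
  else
    let base := if nearest_neighbor_only then 1 + n * (n - 1) ^ 2 + max (n - 2) 0 else 1 + n * (n - 1)
    if include_reshuffling then
      let m := PySem.Int.floordiv n 2
      if nearest_neighbor_only then base + 3 * m + 6 * m * (n - 2) - 6 * m * (m - 1)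
      else base + 3 * m
    else base

-- ===== PRECONDITION & SPEC =====
def Spec_QFT_layer_count (num_qubits : Int) (nearest_neighbor_only : Bool) (include_reshuffling : Bool) (out : Int) : Prop := out = QFT_layer_count_alt num_qubits nearest_neighbor_only include_reshuffling
instance (num_qubits : Int) (nearest_neighbor_only : Bool) (include_reshuffling : Bool) (out : Int) : Decidable (Spec_QFT_layer_count num_qubits nearest_neighbor_only include_reshuffling out) := by unfold Spec_QFT_layer_count; infer_instance

-- ===== CLAIM (what is proved, stated in full; the proofs are below) =====
def Claim_equal_QFT_layer_count : Prop := ∀ (num_qubits : Int) (nearest_neighbor_only : Bool) (include_reshuffling : Bool), Dom_QFT_layer_count num_qubits nearest_neighbor_only include_reshuffling → Spec_QFT_layer_count num_qubits nearest_neighbor_only include_reshuffling (QFT_layer_count num_qubits nearest_neighbor_only include_reshuffling)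

-- ===== LEMMAS AND PROOFS =====

-- inner loop, nearest-neighbor: starting at a (ti+1 ≤ a), d iterations add 2d + 6d(a-ti-1) + 3d(d-1)
lemma pv_inner_nn (ti : Int) : ∀ (d : Nat) (a : Int), ti + 1 ≤ a → ∀ (L : Int) (p : Bool),
    (PySem.List.pyRange a (a + d) 1).foldl (pvInnerBody true ti) (L, p) =
      (L + 2 * d + 6 * d * (a - ti - 1) + 3 * d * (d - 1),
       if d = 0 then p else decide (a + d - ti - 2 > 0)) := by
  intro d
  induction d with
  | zero =>
      intro a _ L p
      rw [show a + ((0 : Nat) : Int) = a by push_cast; ring,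
          PySem.List.pyRange_one_eq_nil le_rfl]
      simp
  | succ d ih =>
      intro a ha L p
      have hlt : a < a + ((d + 1 : Nat) : Int) := by push_cast; omega
      rw [PySem.List.pyRange_one_cons hlt, List.foldl_cons]
      have hrng : a + ((d + 1 : Nat) : Int) = (a + 1) + (d : Int) := by push_cast; ring
      rw [hrng]
      by_cases hns : a - ti - 1 > 0
      · have hbody : pvInnerBody true ti (L, p) a = (L + 3 * (a - ti - 1) + 2 + 3 * (a - ti - 1), true) := by
          simp [pvInnerBody, show (1:Int) < a - ti from by omega]
        rw [hbody, ih (a + 1) (by omega)]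
        refine Prod.ext ?_ ?_
        · push_cast; ring
        · by_cases hd : d = 0 <;> simp [hd] <;> push_cast <;> omega
      · have hns0 : a - ti - 1 = 0 := by omega
        have hbody : pvInnerBody true ti (L, p) a = (L + 2, false) := by
          simp [pvInnerBody, show ¬ (1:Int) < a - ti from by omega]
        rw [hbody, ih (a + 1) (by omega)]
        refine Prod.ext ?_ ?_
        · have ha1 : a = ti + 1 := by omega
          subst ha1; push_cast; ring
        · by_cases hd : d = 0 <;> simp [hd] <;> push_cast <;> omega

-- outer loop, nearest-neighbor: state after t of n targets
lemma pv_outer_nn (n : Int) : ∀ (t : Nat), (t : Int) ≤ n →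
    (PySem.List.pyRange 0 (t : Int) 1).foldl (pvOuterBody n true) (1, false) =
      (1 + n * (n - 1) ^ 2 - (n - t) * (n - t - 1) ^ 2 + max (min ((t : Int) - 1) (n - 2)) 0,
       decide (1 ≤ (t : Int) ∧ 2 ≤ n - t)) := by
  intro t
  induction t with
  | zero =>
      intro _
      rw [show ((0 : Nat) : Int) = 0 by rfl, PySem.List.pyRange_one_eq_nil le_rfl]
      refine Prod.ext ?_ ?_
      · show (1 : Int) = _
        have hmx : max (min (-1 : Int) (n - 2)) 0 = 0 := by omega
        push_cast
        rw [hmx]; ring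
      · simp
  | succ t ih =>
      intro ht
      have ht' : (t : Int) ≤ n := by push_cast at ht ⊢; omega
      have hsr : ((t + 1 : Nat) : Int) = (t : Int) + 1 := by push_cast; ring
      rw [hsr, PySem.List.pyRange_one_succ_right (by positivity), List.foldl_append,
          List.foldl_cons, List.foldl_nil, ih ht']
      show pvOuterBody n true _ _ = _
      unfold pvOuterBody
      have hd : (t : Int) + 1 + ((n - t - 1).toNat : Int) = n := by
        have hnn : (0:Int) ≤ n - t - 1 := by push_cast at ht; omega
        rw [Int.toNat_of_nonneg hnn]; ring
      have hdc : (((n - t - 1).toNat : Int)) = n - t - 1 := by push_cast at ht; omega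
      by_cases hc : 1 ≤ (t : Int) ∧ 2 ≤ n - (t : Int)
      · rw [if_pos (decide_eq_true hc)]
        rw [show n = (t : Int) + 1 + ((n - t - 1).toNat : Int) from hd.symm,
            pv_inner_nn t ((n - t - 1).toNat) ((t : Int) + 1) (by omega), hd, hdc]
        refine Prod.ext ?_ ?_
        · show _ = 1 + n * (n - 1) ^ 2 - (n - ((t:Int)+1)) * (n - ((t:Int)+1) - 1) ^ 2 +
              max (min (((t:Int)+1) - 1) (n - 2)) 0
          have hM : max (min (((t:Int)+1) - 1) (n - 2)) 0 =
              max (min ((t : Int) - 1) (n - 2)) 0 + 1 := by omega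
          rw [hM]; ring
        · by_cases hz : (n - (t:Int) - 1).toNat = 0
          · rw [if_pos hz]; symm
            simp only [decide_eq_false_iff_not]
            push_cast; omega
          · rw [if_neg hz]
            simp only [decide_eq_decide]
            push_cast; constructor <;> intro h <;> omega
      · rw [if_neg (by simpa using hc)]
        rw [show n = (t : Int) + 1 + ((n - t - 1).toNat : Int) from hd.symm,
            pv_inner_nn t ((n - t - 1).toNat) ((t : Int) + 1) (by omega), hd, hdc]
        refine Prod.ext ?_ ?_
        · show _ = 1 + n * (n - 1) ^ 2 - (n - ((t:Int)+1)) * (n - ((t:Int)+1) - 1) ^ 2 +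
              max (min (((t:Int)+1) - 1) (n - 2)) 0
          have hM : max (min (((t:Int)+1) - 1) (n - 2)) 0 =
              max (min ((t : Int) - 1) (n - 2)) 0 := by
            push_cast at ht; omega
          rw [hM]; ring
        · by_cases hz : (n - (t:Int) - 1).toNat = 0
          · rw [if_pos hz]; symm
            simp only [decide_eq_false_iff_not]
            push_cast; omega
          · rw [if_neg hz]
            simp only [decide_eq_decide]
            push_cast; constructor <;> intro h <;> omega

-- inner loop, plain (no swaps): d iterations add 2d, flag unchanged
lemma pv_inner_plain (ti : Int) : ∀ (d : Nat) (a : Int) (L : Int) (p : Bool),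
    (PySem.List.pyRange a (a + d) 1).foldl (pvInnerBody false ti) (L, p) = (L + 2 * d, p) := by
  intro d
  induction d with
  | zero =>
      intro a L p
      rw [show a + ((0 : Nat) : Int) = a by push_cast; ring,
          PySem.List.pyRange_one_eq_nil le_rfl]
      simp
  | succ d ih =>
      intro a L p
      have hlt : a < a + ((d + 1 : Nat) : Int) := by push_cast; omega
      rw [PySem.List.pyRange_one_cons hlt, List.foldl_cons]
      have hrng : a + ((d + 1 : Nat) : Int) = (a + 1) + (d : Int) := by push_cast; ring
      rw [hrng]
      have hbody : pvInnerBody false ti (L, p) a = (L + 2, p) := by simp [pvInnerBody]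
      rw [hbody, ih (a + 1)]
      refine Prod.ext ?_ rfl
      push_cast; ring

-- outer loop, plain: state after t of n targets
lemma pv_outer_plain (n : Int) : ∀ (t : Nat), (t : Int) ≤ n →
    (PySem.List.pyRange 0 (t : Int) 1).foldl (pvOuterBody n false) (1, false) =
      (1 + n * (n - 1) - (n - t) * (n - t - 1), false) := by
  intro t
  induction t with
  | zero =>
      intro _
      rw [show ((0 : Nat) : Int) = 0 by rfl, PySem.List.pyRange_one_eq_nil le_rfl]
      refine Prod.ext ?_ rfl
      show (1 : Int) = _
      push_cast; ring
  | succ t ih =>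
      intro ht
      have ht' : (t : Int) ≤ n := by push_cast at ht ⊢; omega
      have hsr : ((t + 1 : Nat) : Int) = (t : Int) + 1 := by push_cast; ring
      rw [hsr, PySem.List.pyRange_one_succ_right (by positivity), List.foldl_append,
          List.foldl_cons, List.foldl_nil, ih ht']
      show pvOuterBody n false _ _ = _
      unfold pvOuterBody
      simp only [if_neg (by simp : ¬ (false = true))]
      have hd : (t : Int) + 1 + ((n - t - 1).toNat : Int) = n := by
        have hnn : (0:Int) ≤ n - t - 1 := by push_cast at ht; omega
        rw [Int.toNat_of_nonneg hnn]; ring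
      rw [show n = (t : Int) + 1 + ((n - t - 1).toNat : Int) from hd.symm,
          pv_inner_plain t ((n - t - 1).toNat) ((t : Int) + 1)]
      have hdc : (((n - t - 1).toNat : Int)) = n - t - 1 := by push_cast at ht; omega
      rw [hdc]
      refine Prod.ext ?_ rfl
      push_cast; ring

-- reshuffle loop, nearest-neighbor: t iterations add 3t + 6t(n-2) - 6t(t-1)
lemma pv_resh_nn (n : Int) : ∀ (t : Nat) (L : Int),
    (PySem.List.pyRange 0 (t : Int) 1).foldl (pvReshuffleBody n true) L =
      L + 3 * t + 6 * t * (n - 2) - 6 * t * (t - 1) := by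
  intro t
  induction t with
  | zero =>
      intro L
      rw [show ((0 : Nat) : Int) = 0 by rfl, PySem.List.pyRange_one_eq_nil le_rfl]
      simp
  | succ t ih =>
      intro L
      have hsr : ((t + 1 : Nat) : Int) = (t : Int) + 1 := by push_cast; ring
      rw [hsr, PySem.List.pyRange_one_succ_right (by positivity), List.foldl_append,
          List.foldl_cons, List.foldl_nil, ih L]
      show pvReshuffleBody n true _ _ = _
      unfold pvReshuffleBody
      simp only [if_pos rfl]
      push_cast; ring

-- reshuffle loop, plain: t iterations add 3t
lemma pv_resh_plain (n : Int) : ∀ (t : Nat) (L : Int),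
    (PySem.List.pyRange 0 (t : Int) 1).foldl (pvReshuffleBody n false) L = L + 3 * t := by
  intro t
  induction t with
  | zero =>
      intro L
      rw [show ((0 : Nat) : Int) = 0 by rfl, PySem.List.pyRange_one_eq_nil le_rfl]
      simp
  | succ t ih =>
      intro L
      have hsr : ((t + 1 : Nat) : Int) = (t : Int) + 1 := by push_cast; ring
      rw [hsr, PySem.List.pyRange_one_succ_right (by positivity), List.foldl_append,
          List.foldl_cons, List.foldl_nil, ih L]
      show pvReshuffleBody n false _ _ = _
      unfold pvReshuffleBody
      simp only [Bool.false_eq_true, if_neg (by simp : ¬ (false = true))]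
      push_cast; ring

-- ===== VERDICT (by name: the statement is the Claim_ definition above) =====
theorem QFT_layer_count_spec : Claim_equal_QFT_layer_count := by
  unfold Claim_equal_QFT_layer_count
  intro n nn inc _
  unfold Spec_QFT_layer_count QFT_layer_count QFT_layer_count_alt
  have hfd : PySem.Int.floordiv n 2 = n / 2 := PySem.Int.floordiv_eq_ediv_of_pos (by norm_num)
  by_cases hn : n ≤ 0
  · have h1 : PySem.List.pyRange 0 n 1 = [] := PySem.List.pyRange_one_eq_nil hn
    have h2 : PySem.List.pyRange 0 (n / 2) 1 = [] := PySem.List.pyRange_one_eq_nil (by omega)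
    rw [hfd]
    simp [h1, h2, hn]
  · have htc : ((n.toNat : Nat) : Int) = n := Int.toNat_of_nonneg (by omega)
    have hmc : (((n / 2).toNat : Nat) : Int) = n / 2 := Int.toNat_of_nonneg (by omega)
    simp only [if_neg hn]
    cases nn
    · -- plain
      have hout := pv_outer_plain n n.toNat (by rw [htc])
      rw [htc] at hout
      have hres := pv_resh_plain n ((n / 2).toNat)
      rw [hmc] at hres
      rw [hfd, hout]
      cases inc
      · simp only [Bool.false_eq_true, if_false]
        show 1 + n * (n - 1) - (n - n) * (n - n - 1) = 1 + n * (n - 1)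
        ring
      · simp only [if_pos rfl, if_true, Bool.false_eq_true, if_false]
        rw [hres]; ring
    · -- nearest neighbor
      have hout := pv_outer_nn n n.toNat (by rw [htc])
      rw [htc] at hout
      have hres := pv_resh_nn n ((n / 2).toNat)
      rw [hmc] at hres
      rw [hfd, hout]
      have hmm : max (min (n - 1) (n - 2)) 0 = max (n - 2) 0 := by omega
      cases inc
      · simp only [Bool.false_eq_true, if_false]
        show 1 + n * (n - 1) ^ 2 - (n - n) * (n - n - 1) ^ 2 + max (min (n - 1) (n - 2)) 0 =
            1 + n * (n - 1) ^ 2 + max (n - 2) 0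
        rw [hmm]; ring
      · simp only [if_pos rfl, if_true, Bool.false_eq_true, if_false]
        rw [hres, hmm]; ring
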